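-- pv_equiv track=rewrite | github.com/jerry73204/max2sc | scripts/extract_osc_commands.py | generate_osc_report
-- ===== SOURCE A (Python) =====
-- from collections import defaultdict
-- from typing import Dict, List, Set
--
-- def generate_osc_report(namespace: Dict[str, Set[str]]) -> str:
--     """Generate OSC namespace report"""
--     report = []
--     report.append("# OSC Namespace Analysis\n")
--
--     # Group by top-level namespace
--     top_level = defaultdict(set)
--     for path in namespace:
--         if path.count('/') == 1:  # Top level
--             top_level[path] = namespace[path]
--
--     for top_path in sorted(top_level.keys()):
--         report.append(f"## {top_path}\n")
--
--         # Find all sub-paths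
--         sub_paths = []
--         for path in namespace:
--             if path.startswith(top_path + '/') and path != top_path:
--                 sub_paths.append(path)
--
--         # Group by category
--         categories = defaultdict(list)
--         for path in sorted(sub_paths):
--             parts = path.split('/')
--             if len(parts) >= 3:
--                 category = parts[2]
--                 categories[category].append(path)
--
--         for category, paths in sorted(categories.items()):
--             report.append(f"### {category}")
--             for path in sorted(paths)[:10]:  # Limit to 10 examples
--                 report.append(f"- `{path}`")
--             if len(paths) > 10:
--                 report.append(f"- ... and {len(paths) - 10} more")
--             report.append("")
--
--     return '\n'.join(report)
-- ===== SOURCE B (Python) =====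
-- def generate_osc_report(namespace):
--     """Generate OSC namespace report (filter-based: sort the keys once, then build
--     each section/entry with comprehensions over the sorted key list — no dicts)."""
--     keys = sorted(namespace)
--
--     def entry(subs, cat):
--         bucket = [k for k in subs if k.split('/')[2] == cat]
--         return (["### {}".format(cat)]
--                 + ["- `{}`".format(p) for p in bucket[:10]]
--                 + (["- ... and {} more".format(len(bucket) - 10)] if len(bucket) > 10 else [])
--                 + [""])
--
--     def section(top):
--         subs = [k for k in keys if k.startswith(top + '/') and len(k.split('/')) >= 3]
--         cats = sorted({k.split('/')[2] for k in subs})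
--         return ["## {}\n".format(top)] + [line for cat in cats for line in entry(subs, cat)]
--
--     lines = (["# OSC Namespace Analysis\n"]
--              + [line for top in keys if top.count('/') == 1 for line in section(top)])
--     return '\n'.join(lines)
-- ===== Notes on version B (the rewrite author's own statement) =====
-- stated objective: simpler
-- what changed: A groups paths with two defaultdicts (top_level, then per-top categories) built by imperative loops; B uses no dicts at all: it sorts the key list once and builds every section and category entry with plain filter comprehensions over that sorted list (the category set via a set comprehension), a shorter two-helper decomposition.
import Mathlib
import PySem

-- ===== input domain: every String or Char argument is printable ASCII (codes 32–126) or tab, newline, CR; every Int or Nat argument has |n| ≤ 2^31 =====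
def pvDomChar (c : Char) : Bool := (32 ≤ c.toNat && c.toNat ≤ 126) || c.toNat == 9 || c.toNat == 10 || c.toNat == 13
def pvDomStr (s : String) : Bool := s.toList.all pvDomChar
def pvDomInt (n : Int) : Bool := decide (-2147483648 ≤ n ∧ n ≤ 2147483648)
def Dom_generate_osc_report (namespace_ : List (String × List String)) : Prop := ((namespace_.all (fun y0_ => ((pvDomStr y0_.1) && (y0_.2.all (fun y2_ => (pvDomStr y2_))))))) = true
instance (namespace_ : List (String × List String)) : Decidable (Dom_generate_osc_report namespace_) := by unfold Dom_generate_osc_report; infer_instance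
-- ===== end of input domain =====

-- B replaces A's two defaultdict grouping loops by plain filters over the once-sorted key list
-- (a shorter, dict-free decomposition); equivalence is proved for association lists with distinct keys.


-- ===== PORT A =====
-- literal transliteration of A: two defaultdict grouping loops, per-top rescans of the namespace
def generate_osc_report (namespace_ : List (String × List String)) : String :=
  let report : List String := ["# OSC Namespace Analysis\n"]
  -- top_level[path] = namespace[path]: path is a key of the dict, so KeyError is unreachable; getD is exact here
  let top_level : PySem.Dict String (List String) :=
    namespace_.foldl (fun d kv =>
      if PySem.Str.count kv.1 "/" == 1 then
        d.insert kv.1 ((PySem.Dict.mk namespace_).getD kv.1 [])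
      else d) PySem.Dict.empty
  let report := (PySem.List.sorted top_level.keys (fun x => x)).foldl (fun report top_path =>
      let report := report ++ ["## " ++ top_path ++ "\n"]
      let sub_paths : List String := namespace_.foldl (fun sub_paths kv =>
          if PySem.Str.startswith kv.1 (top_path ++ "/") && kv.1 != top_path then
            sub_paths ++ [kv.1] else sub_paths) []
      let categories : PySem.Dict String (List String) :=
        (PySem.List.sorted sub_paths (fun x => x)).foldl (fun categories path =>
            let parts := (PySem.Str.split? path "/").getD []   -- sep "/" ≠ "": split? is some; exact
            if 3 ≤ parts.length then
              categories.modify (parts.getD 2 "") [] (fun ps => ps ++ [path])  -- parts[2]: guarded in range, getD exact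
            else categories) PySem.Dict.empty
      (PySem.List.sorted2 categories.items (fun p => p.1) (fun p => p.2)).foldl
        (fun report cp =>
          let report := report ++ ["### " ++ cp.1]
          let report := (PySem.List.slice (PySem.List.sorted cp.2 (fun x => x)) none (some 10)).foldl
              (fun report path => report ++ ["- `" ++ path ++ "`"]) report
          let report := if 10 < cp.2.length then
              report ++ ["- ... and " ++ PySem.Int.toStr ((cp.2.length : Int) - 10) ++ " more"] else report
          report ++ [""]) report) report
  PySem.Str.join "\n" report

-- ===== PORT B =====
-- literal transliteration of B: helpers entry/section, comprehensions = filter/map/flatMap, no dicts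
def pvEntry (subs : List String) (cat : String) : List String :=
  let bucket := subs.filter (fun k => ((PySem.Str.split? k "/").getD []).getD 2 "" == cat)
  ["### " ++ cat]
    ++ (PySem.List.slice bucket none (some 10)).map (fun p => "- `" ++ p ++ "`")
    ++ (if 10 < bucket.length then ["- ... and " ++ PySem.Int.toStr ((bucket.length : Int) - 10) ++ " more"] else [])
    ++ [""]

def pvSection (keys : List String) (top : String) : List String :=
  let subs := keys.filter (fun k =>
    PySem.Str.startswith k (top ++ "/") && decide (3 ≤ ((PySem.Str.split? k "/").getD []).length))
  let cats := PySem.List.sorted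
    (PySem.Set.ofList (subs.map (fun k => ((PySem.Str.split? k "/").getD []).getD 2 ""))) (fun x => x)
  ["## " ++ top ++ "\n"] ++ cats.flatMap (fun cat => pvEntry subs cat)

def generate_osc_report_alt (namespace_ : List (String × List String)) : String :=
  let keys := PySem.List.sorted (namespace_.map (fun kv => kv.1)) (fun x => x)
  let lines := ["# OSC Namespace Analysis\n"]
    ++ (keys.filter (fun top => PySem.Str.count top "/" == 1)).flatMap (pvSection keys)
  PySem.Str.join "\n" lines

-- ===== PRECONDITION & SPEC =====
-- Pre_ excludes association lists with duplicate keys: they do not represent any Python dict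
-- (the dict argument collapses duplicates before either function runs).
def Pre_generate_osc_report (namespace_ : List (String × List String)) : Prop :=
  (namespace_.map (fun kv => kv.1)).Nodup
instance (namespace_ : List (String × List String)) : Decidable (Pre_generate_osc_report namespace_) := by unfold Pre_generate_osc_report; infer_instance

def pvWitness_generate_osc_report : (List (String × List String)) :=
  [("/max", ["a"]), ("/max/track/1/azim", []), ("/max/track/2/gain", []), ("/sc", [])]

def Spec_generate_osc_report (namespace_ : List (String × List String)) (out : String) : Prop := out = generate_osc_report_alt namespace_
instance (namespace_ : List (String × List String)) (out : String) : Decidable (Spec_generate_osc_report namespace_ out) := by unfold Spec_generate_osc_report; infer_instance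

-- ===== CLAIM (what is proved, stated in full; the proofs are below) =====
def Claim_equal_generate_osc_report : Prop := ∀ (namespace_ : List (String × List String)), Dom_generate_osc_report namespace_ → Pre_generate_osc_report namespace_ → Spec_generate_osc_report namespace_ (generate_osc_report namespace_)

-- ===== LEMMAS AND PROOFS =====

theorem pv_sorted_lt (K : List String) (hK : K.Nodup) :
    (PySem.List.sorted K (fun x => x)).Pairwise (· < ·) := by
  have h1 := PySem.List.sorted_pairwise K (fun x => x)
  have h2 : (PySem.List.sorted K (fun x => x)).Nodup :=
    ((PySem.List.sorted_perm K (fun x => x) false).nodup_iff).mpr hK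
  have := List.Pairwise.and h1 h2
  exact this.imp (fun h => lt_of_le_of_ne h.1 h.2)

theorem pv_sorted_filter (K : List String) (hK : K.Nodup) (p : String → Bool) :
    PySem.List.sorted (K.filter p) (fun x => x) = (PySem.List.sorted K (fun x => x)).filter p :=
  PySem.List.sorted_eq_of_perm_of_pairwise_lt _ _ _
    ((PySem.List.sorted_perm K (fun x => x) false).filter p)
    ((pv_sorted_lt K hK).sublist List.filter_sublist)

theorem pv_insertBy_congr {α : Type} (b1 b2 : α → α → Bool) (x : α) (ys : List α)
    (h : ∀ y ∈ ys, b1 x y = b2 x y) :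
    PySem.List.insertBy b1 x ys = PySem.List.insertBy b2 x ys := by
  induction ys with
  | nil => rfl
  | cons y ys ih =>
    rw [PySem.List.insertBy.eq_2, PySem.List.insertBy.eq_2, h y (by simp),
      ih (fun z hz => h z (by simp [hz]))]

theorem pv_foldl_insertBy_congr {α : Type} (b1 b2 : α → α → Bool) (m : List α)
    (h : ∀ a ∈ m, ∀ b ∈ m, b1 a b = b2 a b) :
    ∀ (l acc : List α), (∀ a ∈ l, a ∈ m) → (∀ a ∈ acc, a ∈ m) →
      l.foldl (fun acc x => PySem.List.insertBy b1 x acc) acc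
        = l.foldl (fun acc x => PySem.List.insertBy b2 x acc) acc := by
  intro l
  induction l with
  | nil => intro acc _ _; rfl
  | cons x l ih =>
    intro acc hl hacc
    have hx : x ∈ m := hl x (by simp)
    simp only [List.foldl_cons]
    rw [pv_insertBy_congr b1 b2 x acc (fun y hy => h x hx y (hacc y hy))]
    exact ih _ (fun a ha => hl a (by simp [ha]))
      (fun a ha => ((PySem.List.mem_insertBy b2 x a acc).mp ha).elim
        (fun he => he ▸ hx) (fun ha' => hacc a ha'))

theorem pv_sorted2_eq_sorted {α : Type} (xs : List α) (k1 : α → String) (k2 : α → List String)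
    (hinj : (xs.map k1).Nodup) :
    PySem.List.sorted2 xs k1 k2 = PySem.List.sorted xs k1 := by
  rw [PySem.List.sorted_eq_foldl_insertBy]
  show xs.foldl (fun acc x => PySem.List.insertBy _ x acc) [] = _
  apply pv_foldl_insertBy_congr _ _ xs _ xs [] (fun a ha => ha) (by simp)
  intro a ha b hb
  by_cases hab : k1 a = k1 b
  · have : ¬ (k1 a < k1 b) := by rw [hab]; exact lt_irrefl _
    have h2 : ¬ (k1 b < k1 a) := by rw [hab]; exact lt_irrefl _
    have hev : a = b := List.inj_on_of_nodup_map hinj ha hb hab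
    subst hev
    simp
  · rcases lt_or_gt_of_ne hab with hlt | hgt
    · simp [hlt]
    · simp [hgt, not_lt_of_gt hgt]

theorem pv_ne_of_startswith (k top : String)
    (h : PySem.Str.startswith k (top ++ "/") = true) : (k != top) = true := by
  rw [PySem.Str.startswith_eq, PySem.Chars.startswith_iff] at h
  have hlen := h.length_le
  rw [String.toList_append] at hlen
  have h1 : ("/" : String).toList.length = 1 := rfl
  rw [List.length_append, h1] at hlen
  rw [bne_iff_ne]
  intro he
  subst he
  omega


theorem pv_cat_keys (f : String → String) (S3 : List String) :
    (S3.foldl (fun d path => d.modify (f path) [] (fun ps => ps ++ [path]))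
      (PySem.Dict.empty : PySem.Dict String (List String))).keys
      = PySem.Set.ofList (S3.map f) := by
  rw [PySem.Dict.keys_foldl_modify_key S3 f [] (fun _ x => fun ps => ps ++ [x])]
  rw [PySem.Dict.keys_empty, PySem.Set.update_nil_left]

theorem pv_cat_getD (f : String → String) (S3 : List String) (c : String) :
    (S3.foldl (fun d path => d.modify (f path) [] (fun ps => ps ++ [path]))
      (PySem.Dict.empty : PySem.Dict String (List String))).getD c []
      = S3.filter (fun k => f k == c) := by
  have h : S3.foldl (fun d path => d.modify (f path) [] (fun ps => ps ++ [path]))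
      (PySem.Dict.empty : PySem.Dict String (List String))
      = (S3.map (fun k => (f k, k))).foldl
          (fun d p => d.modify p.1 [] (fun x => x ++ [p.2])) PySem.Dict.empty := by
    rw [List.foldl_map]
  rw [h, PySem.Dict.getD_foldl_modify_append, PySem.Dict.getD_empty]
  rw [List.filter_map]
  simp [Function.comp_def, List.map_map]

theorem pv_items_sorted (f : String → String) (S3 : List String) :
    PySem.List.sorted2
      ((S3.foldl (fun d path => d.modify (f path) [] (fun ps => ps ++ [path]))
        (PySem.Dict.empty : PySem.Dict String (List String))).items)
      (fun p => p.1) (fun p => p.2)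
      = (PySem.List.sorted (PySem.Set.ofList (S3.map f)) (fun x => x)).map
          (fun c => (c, S3.filter (fun k => f k == c))) := by
  set D := S3.foldl (fun d path => d.modify (f path) [] (fun ps => ps ++ [path]))
        (PySem.Dict.empty : PySem.Dict String (List String)) with hD
  have hkeys : D.keys = PySem.Set.ofList (S3.map f) := pv_cat_keys f S3
  have hnd : D.keys.Nodup := by rw [hkeys]; exact PySem.Set.nodup_ofList _
  have hitems : D.items = D.keys.map (fun k => (k, D.getD k [])) :=
    PySem.Dict.items_eq_map_keys D hnd []
  have hmapfst : (D.items.map (fun p => p.1)).Nodup := by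
    rw [hitems, List.map_map]
    simpa [Function.comp_def] using hnd
  rw [pv_sorted2_eq_sorted _ _ _ hmapfst]
  have hys : ((PySem.List.sorted (PySem.Set.ofList (S3.map f)) (fun x => x)).map
      (fun c => (c, S3.filter (fun k => f k == c)))).Perm D.items := by
    rw [hitems, hkeys]
    have hp : (PySem.List.sorted (PySem.Set.ofList (S3.map f)) (fun x => x)).Perm
        (PySem.Set.ofList (S3.map f)) := PySem.List.sorted_perm _ _ _
    refine (hp.map (fun c => (c, S3.filter (fun k => f k == c)))).trans ?_
    apply List.Perm.of_eq
    apply List.map_congr_left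
    intro c hc
    rw [pv_cat_getD f S3 c]
  refine PySem.List.sorted_eq_of_perm_of_pairwise_lt _ _ _ hys ?_
  rw [List.pairwise_map]
  exact pv_sorted_lt _ (PySem.Set.nodup_ofList _)

theorem pv_map_fst_filter2 (ns : List (String × List String)) (p : String → Bool) :
    List.map Prod.fst (ns.filter (fun x => p x.1)) = (List.map Prod.fst ns).filter p := by
  induction ns with
  | nil => rfl
  | cons a t ih => by_cases h : p a.1 <;> simp [h, ih]

theorem pv_render (S3 : List String) (hS3 : S3.Pairwise (· ≤ ·)) (f : String → String)
    (init : List String) :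
    List.foldl
      (fun report cp =>
        (if 10 < cp.2.length then
            report ++ ["### " ++ cp.1] ++
                List.map (fun x => "- `" ++ x ++ "`")
                  (PySem.List.slice (PySem.List.sorted cp.2 fun x => x) none (some 10)) ++
              ["- ... and " ++ PySem.Int.toStr ((cp.2.length : Int) - 10) ++ " more"]
          else
            report ++ ["### " ++ cp.1] ++
              List.map (fun x => "- `" ++ x ++ "`")
                (PySem.List.slice (PySem.List.sorted cp.2 fun x => x) none (some 10))) ++
          [""])
      init
      ((PySem.List.sorted (PySem.Set.ofList (S3.map f)) (fun x => x)).map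
        (fun c => (c, S3.filter (fun k => f k == c))))
    = init ++ (PySem.List.sorted (PySem.Set.ofList (S3.map f)) (fun x => x)).flatMap
        (fun cat =>
          ["### " ++ cat]
            ++ (PySem.List.slice (S3.filter (fun k => f k == cat)) none (some 10)).map
                (fun p => "- `" ++ p ++ "`")
            ++ (if 10 < (S3.filter (fun k => f k == cat)).length then
                  ["- ... and " ++ PySem.Int.toStr (((S3.filter (fun k => f k == cat)).length : Int) - 10) ++ " more"]
                else [])
            ++ [""]) := by
  rw [List.foldl_map]
  refine (PySem.List.foldl_congr_mem _ _
    (fun acc cat => acc ++ (["### " ++ cat]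
      ++ (PySem.List.slice (S3.filter (fun k => f k == cat)) none (some 10)).map
          (fun p => "- `" ++ p ++ "`")
      ++ (if 10 < (S3.filter (fun k => f k == cat)).length then
            ["- ... and " ++ PySem.Int.toStr (((S3.filter (fun k => f k == cat)).length : Int) - 10) ++ " more"]
          else [])
      ++ [""])) _ ?_).trans (PySem.List.foldl_append_eq_flatMap _ _ _)
  intro acc c _
  have hb : PySem.List.sorted (S3.filter (fun k => f k == c)) (fun x => x)
      = S3.filter (fun k => f k == c) :=
    PySem.List.sorted_eq_self_of_pairwise _ _ (hS3.sublist List.filter_sublist)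
  simp only [hb]
  split_ifs with h10 <;> simp [List.append_assoc]


theorem pv_main (ns : List (String × List String))
    (hK : (ns.map (fun kv => kv.1)).Nodup) :
    generate_osc_report ns = generate_osc_report_alt ns := by
  simp only [generate_osc_report, generate_osc_report_alt]
  congr 1
  simp only [PySem.List.foldl_if_eq_foldl_filter, PySem.List.foldl_ite_eq_foldl_filter,
    PySem.List.foldl_append_singleton_eq_map, PySem.Dict.keys_foldl_insert_key,
    PySem.Dict.keys_empty, PySem.Set.update_nil_left, List.nil_append]
  have pv_eta : List.map (fun kv : String × List String => kv.1) ns = List.map Prod.fst ns := rfl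
  rw [pv_eta] at hK
  simp only [pv_eta]
  rw [pv_map_fst_filter2 ns (fun k => PySem.Str.count k "/" == 1)]
  rw [PySem.Set.ofList_eq_self_of_nodup _ (hK.filter _)]
  rw [pv_sorted_filter _ hK]
  rw [← PySem.List.foldl_append_eq_flatMap (g := pvSection (PySem.List.sorted (List.map Prod.fst ns) (fun x => x)))]
  apply PySem.List.foldl_congr_mem
  intro acc top htop
  rw [pv_map_fst_filter2 ns (fun k => PySem.Str.startswith k (top ++ "/") && k != top)]
  have hdrop : List.filter (fun k => PySem.Str.startswith k (top ++ "/") && k != top)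
      (List.map Prod.fst ns)
      = List.filter (fun k => PySem.Str.startswith k (top ++ "/")) (List.map Prod.fst ns) :=
    List.filter_congr (fun x _ => by
      cases hsw : PySem.Str.startswith x (top ++ "/") with
      | false => simp only [Bool.false_and]
      | true => simp only [Bool.true_and, pv_ne_of_startswith x top hsw])
  rw [hdrop, pv_sorted_filter _ hK, List.filter_filter]
  have hcomm : List.filter
      (fun a => decide (3 ≤ ((PySem.Str.split? a "/").getD []).length)
        && PySem.Str.startswith a (top ++ "/"))
      (PySem.List.sorted (List.map Prod.fst ns) (fun x => x))
      = List.filter (fun k => PySem.Str.startswith k (top ++ "/")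
          && decide (3 ≤ ((PySem.Str.split? k "/").getD []).length))
        (PySem.List.sorted (List.map Prod.fst ns) (fun x => x)) :=
    List.filter_congr (fun x _ => Bool.and_comm _ _)
  rw [hcomm]
  set S3 := List.filter (fun k => PySem.Str.startswith k (top ++ "/")
      && decide (3 ≤ ((PySem.Str.split? k "/").getD []).length))
    (PySem.List.sorted (List.map Prod.fst ns) (fun x => x)) with hS3def
  have hS3p : S3.Pairwise (· ≤ ·) :=
    (((pv_sorted_lt _ hK).imp le_of_lt).sublist List.filter_sublist)
  rw [pv_items_sorted (fun k => ((PySem.Str.split? k "/").getD []).getD 2 "") S3]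
  rw [pv_render S3 hS3p (fun k => ((PySem.Str.split? k "/").getD []).getD 2 "") _]
  simp only [pvSection, pvEntry]
  rw [← hS3def]
  simp [List.append_assoc]

-- ===== VERDICT (by name: the statement is the Claim_ definition above) =====
theorem generate_osc_report_spec : Claim_equal_generate_osc_report := by
  intro ns _ hPre
  unfold Spec_generate_osc_report
  exact pv_main ns hPre
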